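-- pv_equiv track=rewrite | github.com/aimtgreports-makers/vehicle-dynamics-lab | experiments/exp1_base.py | face_neighbors
-- ===== SOURCE A (Python) =====
-- edges = [(0, 1), (1, 2), (2, 3)]
--
-- phi = {
--     (0, 1): ("+x", "-x"),
--     (1, 2): ("+x", "-x"),
--     (2, 3): ("+x", "-x"),
-- }
--
-- def face_neighbors(i, f):
--     """Devuelve vecinos j tales que el componente f de i interactúa con j."""
--     out = []
--     for (a, b) in edges:
--         if (a, b) in phi:
--             fa, fb = phi[(a, b)]
--             if a == i and fa == f:
--                 out.append((b, fb))
--         if (a, b) in phi: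
--             fa, fb = phi[(a, b)]
--             # interacción inversa
--             if b == i and fb == f:
--                 out.append((a, fa))
--     return out
-- ===== SOURCE B (Python) =====
-- edges = [(0, 1), (1, 2), (2, 3)]
--
-- phi = {
--     (0, 1): ("+x", "-x"),
--     (1, 2): ("+x", "-x"),
--     (2, 3): ("+x", "-x"),
-- }
--
-- # Build an index once: (node, face) -> list of (neighbor, neighbor_face),
-- # recording forward then reverse interaction per edge, in edge order.
-- _index = {}
-- for (_a, _b) in edges:
--     if (_a, _b) in phi:
--         _fa, _fb = phi[(_a, _b)]
--         _index.setdefault((_a, _fa), []).append((_b, _fb))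
--         _index.setdefault((_b, _fb), []).append((_a, _fa))
--
-- def face_neighbors(i, f):
--     """Devuelve vecinos j tales que el componente f de i interactúa con j."""
--     return list(_index.get((i, f), []))
-- ===== Notes on version B (the rewrite author's own statement) =====
-- stated objective: faster
-- what changed: B builds a module-level index dict (node,face)->list of (neighbor,face) once over the edges and answers each call by a single dict lookup plus copy, instead of A's per-call scan of all edges with repeated phi lookups.
import Mathlib
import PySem

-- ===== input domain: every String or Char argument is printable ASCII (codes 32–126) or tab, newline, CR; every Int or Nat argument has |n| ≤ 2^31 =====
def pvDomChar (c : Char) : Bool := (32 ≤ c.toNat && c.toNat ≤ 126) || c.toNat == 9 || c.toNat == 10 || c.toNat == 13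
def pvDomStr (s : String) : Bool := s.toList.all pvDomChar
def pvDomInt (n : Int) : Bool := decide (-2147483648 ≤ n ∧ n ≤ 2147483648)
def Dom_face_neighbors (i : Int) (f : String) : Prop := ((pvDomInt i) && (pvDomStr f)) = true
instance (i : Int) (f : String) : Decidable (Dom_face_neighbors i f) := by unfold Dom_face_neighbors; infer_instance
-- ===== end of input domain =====

-- B precomputes a (node,face)->neighbors index once and answers by one lookup, replacing A's per-call scan of all edges (return-value equivalence; same module constants).
-- ===== PORT A =====
def pyEdges : List (Int × Int) := [(0, 1), (1, 2), (2, 3)]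

def pyPhi : PySem.Dict (Int × Int) (String × String) :=
  PySem.Dict.ofList [((0, 1), ("+x", "-x")), ((1, 2), ("+x", "-x")), ((2, 3), ("+x", "-x"))]

def face_neighbors (i : Int) (f : String) : List (Int × String) :=
  pyEdges.foldl (fun out p =>
    let out :=
      match pyPhi.get? (p.1, p.2) with
      | some (fa, fb) => if p.1 = i ∧ fa = f then out ++ [(p.2, fb)] else out
      | none => out
    match pyPhi.get? (p.1, p.2) with
    | some (fa, fb) => if p.2 = i ∧ fb = f then out ++ [(p.1, fa)] else out
    | none => out) []

-- ===== PORT B =====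
-- the precomputed index: setdefault(...,[]).append ported as insert with getD-append
def pyIndex : PySem.Dict (Int × String) (List (Int × String)) :=
  pyEdges.foldl (fun d p =>
    match pyPhi.get? (p.1, p.2) with
    | some (fa, fb) =>
        let d := d.insert (p.1, fa) (d.getD (p.1, fa) [] ++ [(p.2, fb)])
        d.insert (p.2, fb) (d.getD (p.2, fb) [] ++ [(p.1, fa)])
    | none => d) PySem.Dict.empty

def face_neighbors_alt (i : Int) (f : String) : List (Int × String) :=
  pyIndex.getD (i, f) []

-- ===== PRECONDITION & SPEC =====
def Spec_face_neighbors (i : Int) (f : String) (out : List (Int × String)) : Prop := out = face_neighbors_alt i f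
instance (i : Int) (f : String) (out : List (Int × String)) : Decidable (Spec_face_neighbors i f out) := by unfold Spec_face_neighbors; infer_instance

-- ===== CLAIM (what is proved, stated in full; the proofs are below) =====
def Claim_equal_face_neighbors : Prop := ∀ (i : Int) (f : String), Dom_face_neighbors i f → Spec_face_neighbors i f (face_neighbors i f)

-- ===== LEMMAS AND PROOFS =====

-- ===== VERDICT (by name: the statement is the Claim_ definition above) =====
-- proof-only helpers: evaluate the closed constants once
lemma idx_eq : pyIndex = PySem.Dict.mk
    [((0, "+x"), [(1, "-x")]), ((1, "-x"), [(0, "+x")]),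
     ((1, "+x"), [(2, "-x")]), ((2, "-x"), [(1, "+x")]),
     ((2, "+x"), [(3, "-x")]), ((3, "-x"), [(2, "+x")])] := by decide

lemma ports_eq (i : Int) (f : String) : face_neighbors i f = face_neighbors_alt i f := by
  have e01 : pyPhi.get? (0, 1) = some ("+x", "-x") := rfl
  have e12 : pyPhi.get? (1, 2) = some ("+x", "-x") := rfl
  have e23 : pyPhi.get? (2, 3) = some ("+x", "-x") := rfl
  have enil : (PySem.Dict.mk ([] : List ((Int × String) × List (Int × String)))).get? (i, f) = none := rfl
  by_cases hp : f = "+x"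
  · subst hp
    by_cases h0 : i = 0
    · subst h0; decide
    by_cases h1 : i = 1
    · subst h1; decide
    by_cases h2 : i = 2
    · subst h2; decide
    simp [face_neighbors, face_neighbors_alt, pyEdges, e01, e12, e23, idx_eq, enil,
      PySem.Dict.getD, PySem.Dict.get?_mk_cons,
      beq_iff_eq, Prod.mk.injEq,
      eq_false (Ne.symm h0), eq_false (Ne.symm h1), eq_false (Ne.symm h2)]
  by_cases hm : f = "-x"
  · subst hm
    by_cases h1 : i = 1
    · subst h1; decide
    by_cases h2 : i = 2
    · subst h2; decide
    by_cases h3 : i = 3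
    · subst h3; decide
    simp [face_neighbors, face_neighbors_alt, pyEdges, e01, e12, e23, idx_eq, enil,
      PySem.Dict.getD, PySem.Dict.get?_mk_cons,
      beq_iff_eq, Prod.mk.injEq,
      eq_false (Ne.symm h1), eq_false (Ne.symm h2), eq_false (Ne.symm h3)]
  simp [face_neighbors, face_neighbors_alt, pyEdges, e01, e12, e23, idx_eq, enil,
    PySem.Dict.getD, PySem.Dict.get?_mk_cons,
    beq_iff_eq, Prod.mk.injEq,
    eq_false (Ne.symm hp), eq_false (Ne.symm hm)]

theorem face_neighbors_spec : Claim_equal_face_neighbors := by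
  intro i f _
  unfold Spec_face_neighbors
  exact ports_eq i f
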